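-- pv_equiv track=rewrite | github.com/CPerelson/NumberToText | Practicum1.py | replace_number_with_string
-- ===== SOURCE A (Python) =====
-- def number_to_string(number):
--     mapping_number_string = {
--         '0': 'zero',
--         '1': 'one',
--         '2': 'two',
--         '3': 'three',
--         '4': 'four',
--         '5': 'five',
--         '6': 'six',
--         '7': 'seven',
--         '8': 'eight',
--         '9': 'nine',
--         '10': 'ten',
--         '11': 'eleven',
--         '12': 'twelve',
--         '13': 'thirteen',
--         '14': 'fourteen',
--         '15': 'fifteen',
--         '16': 'sixteen',
--         '17': 'seventeen',
--         '18': 'eighteen',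
--         '19': 'nineteen',
--         '20': 'twenty',
--         '30': 'thirty',
--         '40': 'forty',
--         '50': 'fifty',
--         '60': 'sixty',
--         '70': 'seventy',
--         '80': 'eighty',
--         '90': 'ninety'
--     }
--
--     # convert the number to text
--     if 0 <= number <= 20 or number % 10 == 0:
--         return mapping_number_string[str(number)]
--     else:
--         return mapping_number_string[str(number // 10 * 10)] + '-' + mapping_number_string[str(number % 10)]
--
-- def replace_number_with_string(user_string):
--     words = user_string.split()
--     result = []
--
--     for word in words:
--         if word.isdigit() and 0 <= int(word) <= 99:
--             result.append(number_to_string(int(word)))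
--         else:
--             result.append(word)
--     return ' '.join(result)
-- ===== SOURCE B (Python) =====
-- # Precomputed 0..99 word table (ones list composed with tens list) + direct indexing, instead of per-number arithmetic branching.
-- _ONES = ['zero', 'one', 'two', 'three', 'four', 'five', 'six', 'seven', 'eight',
--          'nine', 'ten', 'eleven', 'twelve', 'thirteen', 'fourteen', 'fifteen',
--          'sixteen', 'seventeen', 'eighteen', 'nineteen']
-- _TENS = ['twenty', 'thirty', 'forty', 'fifty', 'sixty', 'seventy', 'eighty', 'ninety']
-- _TABLE = _ONES + [t if d == 0 else t + '-' + _ONES[d] for t in _TENS for d in range(10)]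
--
-- def replace_number_with_string(user_string):
--     return ' '.join(
--         _TABLE[int(w)] if w.isdigit() and 0 <= int(w) <= 99 else w
--         for w in user_string.split())
-- ===== Notes on version B (the rewrite author's own statement) =====
-- stated objective: simpler
-- what changed: Replaces A's per-number arithmetic branching (dict lookups keyed by str(n), n//10*10 and n%10 composition at every call) with a table of all 100 number words built once from a ones list and a tens list, so each numeric token is converted by a single index into the table.
import Mathlib
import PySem

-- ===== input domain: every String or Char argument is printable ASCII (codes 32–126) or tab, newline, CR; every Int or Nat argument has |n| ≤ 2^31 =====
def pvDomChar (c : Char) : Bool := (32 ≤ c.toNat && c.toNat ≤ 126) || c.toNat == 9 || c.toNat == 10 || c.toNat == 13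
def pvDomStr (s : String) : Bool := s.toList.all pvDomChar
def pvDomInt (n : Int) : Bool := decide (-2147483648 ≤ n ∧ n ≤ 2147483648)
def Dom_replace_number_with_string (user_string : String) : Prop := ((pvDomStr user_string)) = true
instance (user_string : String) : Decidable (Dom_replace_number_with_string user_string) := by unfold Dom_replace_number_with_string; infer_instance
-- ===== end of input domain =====

-- B replaces A's per-number arithmetic branch conversion by a precomputed 0..99 word table (ones ++ tens×digits) indexed directly; objective: simpler.

-- ===== PORT A =====
def pvMapping : PySem.Dict String String := PySem.Dict.ofList
  [("0", "zero"), ("1", "one"), ("2", "two"), ("3", "three"), ("4", "four"),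
   ("5", "five"), ("6", "six"), ("7", "seven"), ("8", "eight"), ("9", "nine"),
   ("10", "ten"), ("11", "eleven"), ("12", "twelve"), ("13", "thirteen"),
   ("14", "fourteen"), ("15", "fifteen"), ("16", "sixteen"), ("17", "seventeen"),
   ("18", "eighteen"), ("19", "nineteen"), ("20", "twenty"), ("30", "thirty"),
   ("40", "forty"), ("50", "fifty"), ("60", "sixty"), ("70", "seventy"),
   ("80", "eighty"), ("90", "ninety")]

-- KeyError is unreachable here: the only caller guards 0 ≤ number ≤ 99, so every lookup hits; the `getD ""` default is never used.
def number_to_string (number : Int) : String :=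
  if (0 ≤ number ∧ number ≤ 20) ∨ PySem.Int.mod number 10 = 0 then
    (pvMapping.get? (PySem.Int.toStr number)).getD ""
  else
    (pvMapping.get? (PySem.Int.toStr (PySem.Int.floordiv number 10 * 10))).getD "" ++ "-"
      ++ (pvMapping.get? (PySem.Int.toStr (PySem.Int.mod number 10))).getD ""

-- `int(word)` cannot raise where the guard consults it: on the ASCII domain `word.isdigit()` implies int(word) parses, so `getD 0` is never used.
def replace_number_with_string (user_string : String) : String :=
  let words := PySem.Str.split₀ user_string
  let result := words.foldl (fun result word =>
    let n := (PySem.Int.ofStr? word).getD 0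
    if PySem.Str.strIsdigit word && decide (0 ≤ n) && decide (n ≤ 99) then
      result ++ [number_to_string n]
    else
      result ++ [word]) []
  PySem.Str.join " " result

-- ===== PORT B =====
def pvOnes : List String :=
  ["zero", "one", "two", "three", "four", "five", "six", "seven", "eight",
   "nine", "ten", "eleven", "twelve", "thirteen", "fourteen", "fifteen",
   "sixteen", "seventeen", "eighteen", "nineteen"]

def pvTens : List String :=
  ["twenty", "thirty", "forty", "fifty", "sixty", "seventy", "eighty", "ninety"]

def pvTable : List String :=
  pvOnes ++ pvTens.flatMap (fun t =>
    (List.range 10).map (fun d => if d = 0 then t else t ++ "-" ++ pvOnes.getD d ""))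

def replace_number_with_string_alt (user_string : String) : String :=
  PySem.Str.join " " ((PySem.Str.split₀ user_string).map (fun w =>
    let n := (PySem.Int.ofStr? w).getD 0
    if PySem.Str.strIsdigit w && decide (0 ≤ n) && decide (n ≤ 99) then
      pvTable.getD n.toNat ""
    else w))

-- ===== PRECONDITION & SPEC =====
def Spec_replace_number_with_string (user_string : String) (out : String) : Prop := out = replace_number_with_string_alt user_string
instance (user_string : String) (out : String) : Decidable (Spec_replace_number_with_string user_string out) := by unfold Spec_replace_number_with_string; infer_instance

-- ===== CLAIM (what is proved, stated in full; the proofs are below) =====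
def Claim_equal_replace_number_with_string : Prop := ∀ (user_string : String), Dom_replace_number_with_string user_string → Spec_replace_number_with_string user_string (replace_number_with_string user_string)

-- ===== LEMMAS AND PROOFS =====

-- the table agrees with A's arithmetic conversion on every 0 ≤ n ≤ 99
set_option maxRecDepth 4000 in
theorem table_eq_fin : ∀ k : Fin 100, number_to_string (k : Int) = pvTable.getD (k : Nat) "" := by
  decide

theorem table_eq (n : Int) (h0 : 0 ≤ n) (h1 : n ≤ 99) :
    number_to_string n = pvTable.getD n.toNat "" := by
  have hk : n.toNat < 100 := by omega
  have := table_eq_fin ⟨n.toNat, hk⟩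
  simpa [Int.toNat_of_nonneg h0] using this

-- ===== VERDICT (by name: the statement is the Claim_ definition above) =====
theorem replace_number_with_string_spec : Claim_equal_replace_number_with_string := by
  intro s _
  unfold Spec_replace_number_with_string replace_number_with_string replace_number_with_string_alt
  refine congrArg (PySem.Str.join " ") ?_
  have hbody : (fun (result : List String) (word : String) =>
      let n := (PySem.Int.ofStr? word).getD 0
      if PySem.Str.strIsdigit word && decide (0 ≤ n) && decide (n ≤ 99) then
        result ++ [number_to_string n]
      else result ++ [word])
      = fun (result : List String) (word : String) =>
        result ++ [let n := (PySem.Int.ofStr? word).getD 0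
          if PySem.Str.strIsdigit word && decide (0 ≤ n) && decide (n ≤ 99) then
            number_to_string n
          else word] := by
    funext r w
    exact (apply_ite (fun z => r ++ [z]) _ _ _).symm
  rw [hbody, PySem.List.foldl_append_singleton_eq_map, List.nil_append]
  refine List.map_congr_left ?_
  intro w _
  by_cases h : (PySem.Str.strIsdigit w && decide (0 ≤ (PySem.Int.ofStr? w).getD 0)
      && decide ((PySem.Int.ofStr? w).getD 0 ≤ 99)) = true
  · rw [if_pos h, if_pos h]
    simp only [Bool.and_eq_true, decide_eq_true_eq] at h
    exact table_eq _ h.1.2 h.2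
  · rw [if_neg h, if_neg h]
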